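-- pv_equiv track=rewrite | github.com/nhkhiemSWE/MIT-6.106-lazerChess_project | scripts/generate_opening_book.py | create_lookup_tables
-- ===== SOURCE A (Python) =====
-- def create_lookup_tables(processed_moves):
--     lookup_tables = {}
--     for depth in range(1, max(len(moves) for moves in processed_moves) + 1):
--         table = []
--         for moves in processed_moves:
--             if len(moves) >= depth:
--                 history = ''.join(moves[:depth-1])
--                 best_move = moves[depth-1]
--                 table.append((history, best_move))
--         lookup_tables[depth] = table
--     return lookup_tables
-- ===== SOURCE B (Python) =====
-- def create_lookup_tables(processed_moves):
--     # One pass over the sequences: extend each history incrementally and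
--     # append into per-depth tables (A rebuilds every prefix join per depth).
--     maxlen = max((len(moves) for moves in processed_moves), default=0)
--     tables = [[] for _ in range(maxlen)]
--     for moves in processed_moves:
--         history = ''
--         for i, move in enumerate(moves):
--             tables[i].append((history, move))
--             history += move
--     return {d + 1: tables[d] for d in range(maxlen)}
-- ===== Notes on version B (the rewrite author's own statement) =====
-- stated objective: faster
-- what changed: A rescans all sequences once per depth and re-joins each prefix from scratch; B makes one pass over the sequences, extending each history string incrementally and appending into per-depth tables, then emits the tables keyed 1..maxlen.
import Mathlib
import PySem

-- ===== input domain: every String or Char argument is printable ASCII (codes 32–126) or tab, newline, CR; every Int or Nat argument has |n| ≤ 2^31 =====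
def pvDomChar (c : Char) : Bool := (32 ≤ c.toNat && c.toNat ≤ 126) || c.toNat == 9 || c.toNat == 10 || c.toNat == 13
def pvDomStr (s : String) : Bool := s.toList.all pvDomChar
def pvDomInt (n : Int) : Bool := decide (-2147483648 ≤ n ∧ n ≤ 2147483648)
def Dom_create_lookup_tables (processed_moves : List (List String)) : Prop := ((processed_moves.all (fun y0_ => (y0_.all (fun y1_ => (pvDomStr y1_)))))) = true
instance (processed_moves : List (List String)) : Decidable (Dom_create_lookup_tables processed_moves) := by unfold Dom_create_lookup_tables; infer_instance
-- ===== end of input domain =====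

-- B replaces A's per-depth rescans (each re-joining the prefix from scratch) by ONE pass over the
-- sequences that extends each history incrementally and appends into per-depth tables.

-- ===== PORT A =====
-- inner loop 'for moves in processed_moves: if len(moves) >= depth: table.append(.., ..)';
-- moves[depth-1] is in range under the guard, so pyGetD's default is never used
def pvTableA (processed_moves : List (List String)) (depth : Int) : List (String × String) :=
  processed_moves.foldl
    (fun table moves =>
      if (moves.length : Int) ≥ depth then
        table ++ [(PySem.Str.join "" (PySem.List.slice moves none (some (depth - 1))),
                   PySem.List.pyGetD moves (depth - 1) "")]
      else table) []

def create_lookup_tables (processed_moves : List (List String)) : List (Int × List (String × String)) :=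
  -- max(gen) raises ValueError on an empty processed_moves: that input is excluded by Pre_
  let m : Int := (PySem.List.max? (processed_moves.map (fun moves => (moves.length : Int))) (fun x => x)).getD 0
  ((PySem.List.pyRange 1 (m + 1)).foldl
      (fun lookup_tables depth => lookup_tables.insert depth (pvTableA processed_moves depth))
      (PySem.Dict.empty : PySem.Dict Int (List (String × String)))).items

-- ===== PORT B =====
-- 'tables[i].append((history, move)); history += move' over enumerate(moves); the enumerate
-- index is ≥ 0 so .toNat is exact here
def pvStepB (st : List (List (String × String)) × String) (p : Int × String) :
    List (List (String × String)) × String :=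
  (st.1.modify p.1.toNat (fun t => t ++ [(st.2, p.2)]), st.2 ++ p.2)

def pvInnerB (tables : List (List (String × String))) (moves : List String) :
    List (List (String × String)) :=
  ((PySem.List.enumerate moves).foldl pvStepB (tables, "")).1

def create_lookup_tables_alt (processed_moves : List (List String)) : List (Int × List (String × String)) :=
  let maxlen : Int := PySem.List.maxD (processed_moves.map (fun moves => (moves.length : Int))) (fun x => x) 0
  let tables0 : List (List (String × String)) := (PySem.List.pyRange 0 maxlen).map (fun _ => [])
  let tables := processed_moves.foldl pvInnerB tables0
  ((PySem.List.pyRange 0 maxlen).foldl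
      (fun d i => d.insert (i + 1) (PySem.List.pyGetD tables i []))
      (PySem.Dict.empty : PySem.Dict Int (List (String × String)))).items

-- ===== PRECONDITION & SPEC =====
-- Pre_ excludes only the empty list, on which A's 'max(...)' raises ValueError
def Pre_create_lookup_tables (processed_moves : List (List String)) : Prop := processed_moves ≠ []
instance (processed_moves : List (List String)) : Decidable (Pre_create_lookup_tables processed_moves) := by unfold Pre_create_lookup_tables; infer_instance
def pvWitness_create_lookup_tables : List (List String) := [["a", "b"], ["a"]]

def Spec_create_lookup_tables (processed_moves : List (List String)) (out : List (Int × List (String × String))) : Prop := out = create_lookup_tables_alt processed_moves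
instance (processed_moves : List (List String)) (out : List (Int × List (String × String))) : Decidable (Spec_create_lookup_tables processed_moves out) := by unfold Spec_create_lookup_tables; infer_instance

-- ===== CLAIM (what is proved, stated in full; the proofs are below) =====
def Claim_equal_create_lookup_tables : Prop := ∀ (processed_moves : List (List String)), Dom_create_lookup_tables processed_moves → Pre_create_lookup_tables processed_moves → Spec_create_lookup_tables processed_moves (create_lookup_tables processed_moves)

-- ===== LEMMAS AND PROOFS =====

-- the common value both programs put at depth k+1 (0-based k)
def pvTbl (pm : List (List String)) (k : Nat) : List (String × String) :=
  (pm.filter (fun m => decide (k < m.length))).map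
    (fun m => (PySem.Str.join "" (m.take k), m.getD k ""))

theorem join_empty_cons (x : String) (l : List String) :
    PySem.Str.join "" (x :: l) = x ++ PySem.Str.join "" l := by
  apply String.toList_injective
  simp only [PySem.Str.toList_join, List.map_cons, String.toList_append]
  cases l <;> simp [PySem.Chars.join_cons_cons, PySem.Chars.join_singleton, PySem.Chars.join_nil]

theorem tableA_eq_tbl (pm : List (List String)) (k : Nat) :
    pvTableA pm (1 + (k : Int)) = pvTbl pm k := by
  unfold pvTableA pvTbl
  rw [PySem.List.foldl_append_ite
      (p := fun (m : List String) => (m.length : Int) >= 1 + (k : Int))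
      (f := fun m => (PySem.Str.join "" (PySem.List.slice m none (some (1 + (k : Int) - 1))),
                      PySem.List.pyGetD m (1 + (k : Int) - 1) ""))]
  have h1 : (1 : Int) + (k : Int) - 1 = ((k : Nat) : Int) := by ring
  have h2 : pm.filter (fun (m : List String) => decide ((m.length : Int) >= 1 + (k : Int)))
      = pm.filter (fun m => decide (k < m.length)) := by
    apply List.filter_congr; intro m _; simp only [decide_eq_decide]; omega
  simp only [h1, PySem.List.slice_to_natCast, PySem.List.pyGetD_natCast, List.nil_append, h2]

theorem A_eq (pm : List (List String)) :
    create_lookup_tables pm =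
      (List.range ((PySem.List.max? (pm.map (fun m => (m.length : Int))) (fun x => x)).getD 0).toNat).map
        (fun (k : Nat) => (1 + (k : Int), pvTbl pm k)) := by
  unfold create_lookup_tables
  set m : Int := (PySem.List.max? (pm.map (fun m => (m.length : Int))) (fun x => x)).getD 0 with hm
  rw [PySem.Dict.items_foldl_insert_fresh (PySem.List.pyRange 1 (m + 1)) (fun d => d)
        (fun depth => pvTableA pm depth) PySem.Dict.empty
        (fun a _ => PySem.Dict.contains_empty a)
        (by simpa using PySem.List.nodup_pyRange_one 1 (m + 1))]
  rw [PySem.List.pyRange_one]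
  simp only [List.map_map]
  have h : (m + 1 - 1).toNat = m.toNat := by omega
  rw [h]
  apply List.map_congr_left
  intro k _
  simp [tableA_eq_tbl]

theorem inner_spec (moves : List String) (s : Nat) (tables : List (List (String × String)))
    (hist : String) (k : Nat) :
    (((PySem.List.enumerate moves (s : Int)).foldl pvStepB (tables, hist)).1)[k]? =
      if s <= k ∧ k < s + moves.length
      then tables[k]?.map (fun t =>
        t ++ [(hist ++ PySem.Str.join "" (moves.take (k - s)), moves.getD (k - s) "")])
      else tables[k]? := by
  induction moves generalizing s tables hist with
  | nil => simp [PySem.List.enumerate_nil]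
  | cons x rest ih =>
    rw [PySem.List.enumerate_cons, List.foldl_cons]
    have hcast : (s : Int) + 1 = ((s + 1 : Nat) : Int) := by push_cast; ring
    show (((PySem.List.enumerate rest ((s : Int) + 1)).foldl pvStepB
        (tables.modify (s : Int).toNat (fun t => t ++ [(hist, x)]), hist ++ x)).1)[k]? = _
    rw [hcast, ih (s + 1) _ (hist ++ x)]
    simp only [Int.toNat_natCast]
    by_cases h1 : k = s
    · subst h1
      rw [if_neg (by omega), if_pos ⟨Nat.le_refl k, by simp⟩]
      rw [List.getElem?_modify]
      have hj : PySem.Str.join "" ([] : List String) = "" := rfl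
      cases tables[k]? <;> simp [hj, String.append_empty]
    · by_cases h2 : s + 1 <= k ∧ k < s + 1 + rest.length
      · rw [if_pos h2, if_pos (by simp; omega)]
        rw [List.getElem?_modify]
        have htake : (x :: rest).take (k - s) = x :: rest.take (k - s - 1) := by
          have h : k - s = (k - s - 1) + 1 := by omega
          rw [h]; rfl
        have hgd : (x :: rest).getD (k - s) "" = rest.getD (k - s - 1) "" := by
          have h : k - s = (k - s - 1) + 1 := by omega
          rw [h]; rfl
        rw [htake, hgd, join_empty_cons]
        have hne : ¬ (s = k) := fun h => h1 h.symm
        simp [hne, Nat.sub_sub, String.append_assoc, List.getD]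
      · rw [if_neg h2, if_neg (by simp at h2 ⊢; omega)]
        rw [List.getElem?_modify]
        have hne : ¬ (s = k) := fun h => h1 h.symm
        simp [hne]

theorem outer_spec (pm : List (List String)) (tables : List (List (String × String))) (k : Nat) :
    ((pm.foldl pvInnerB tables))[k]? = tables[k]?.map (· ++ pvTbl pm k) := by
  induction pm generalizing tables with
  | nil =>
    simp only [List.foldl_nil, pvTbl, List.filter_nil, List.map_nil, List.append_nil]
    cases tables[k]? <;> rfl
  | cons m rest ih =>
    rw [List.foldl_cons, ih]
    have h0 : pvInnerB tables m
        = ((PySem.List.enumerate m ((0 : Nat) : Int)).foldl pvStepB (tables, "")).1 := rfl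
    rw [h0, inner_spec m 0 tables "" k]
    simp only [Nat.zero_add, Nat.sub_zero, Nat.zero_le, true_and, String.empty_append]
    by_cases h : k < m.length
    · rw [if_pos h]
      cases tables[k]? <;> simp [pvTbl, h]
    · rw [if_neg h]
      cases tables[k]? <;> simp [pvTbl, h]

theorem B_eq (pm : List (List String)) :
    create_lookup_tables_alt pm =
      (List.range ((PySem.List.max? (pm.map (fun m => (m.length : Int))) (fun x => x)).getD 0).toNat).map
        (fun (k : Nat) => (1 + (k : Int), pvTbl pm k)) := by
  unfold create_lookup_tables_alt
  set m : Int := (PySem.List.max? (pm.map (fun m => (m.length : Int))) (fun x => x)).getD 0 with hm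
  have hmaxD : PySem.List.maxD (pm.map (fun moves => (moves.length : Int))) (fun x => x) 0 = m := rfl
  rw [hmaxD]
  rw [PySem.Dict.items_foldl_insert_fresh (PySem.List.pyRange 0 m) (fun i => i + 1)
        (fun i => PySem.List.pyGetD (pm.foldl pvInnerB ((PySem.List.pyRange 0 m).map (fun _ => []))) i [])
        PySem.Dict.empty
        (fun a _ => PySem.Dict.contains_empty _)
        ((PySem.List.nodup_pyRange_one 0 m).map (fun a b h => by omega))]
  rw [PySem.List.pyRange_one]
  simp only [List.map_map, Int.sub_zero]
  apply List.map_congr_left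
  intro k hk
  rw [List.mem_range] at hk
  have hcast : (0 : Int) + (k : Nat) = ((k : Nat) : Int) := by ring
  simp only [Function.comp_apply, hcast]
  have h0 : (List.map ((fun _ => ([] : List (String × String))) ∘ fun k => (0 : Int) + (k : Nat))
      (List.range m.toNat)) = List.replicate m.toNat [] := by
    simp [List.eq_replicate_iff]
  rw [h0, PySem.List.pyGetD_natCast, List.getD_eq_getElem?_getD, outer_spec pm _ k,
      List.getElem?_replicate, if_pos hk]
  rw [show ((k : Int) + 1) = 1 + (k : Int) from by ring]
  simp

-- ===== VERDICT (by name: the statement is the Claim_ definition above) =====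
theorem create_lookup_tables_spec : Claim_equal_create_lookup_tables := by
  intro pm _ _
  unfold Spec_create_lookup_tables
  rw [A_eq, B_eq]
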